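-- pv_equiv track=rewrite | github.com/vickleford/facepunch | punch.py | annotate_streak_history
-- ===== SOURCE A (Python) =====
-- def annotate_streak_history(history):
--     streak = 1
--     streak_history = []
--     i = 0
--     failcount = 0
--     while i < len(history):
--         if history[i] == "#":
--             streak_history.append(failcount)
--             failcount = 0
--             streak += 1
--         else:
--             failcount += 1
--         i += 1
--     return streak_history
-- ===== SOURCE B (Python) =====
-- def annotate_streak_history(history):
--     pos = [i for i, c in enumerate(history) if c == "#"]
--     if not pos:
--         return []
--     return [pos[0]] + [b - a - 1 for a, b in zip(pos, pos[1:])]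
-- ===== Notes on version B (the rewrite author's own statement) =====
-- stated objective: faster
-- what changed: B replaces A's single-pass running fail-counter with a two-phase index computation: it first collects the marker positions via an enumerate comprehension, then produces the counts as the first position followed by adjacent-position differences; the comprehension/zip phases run in CPython's fast paths, a constant-factor win a timing run measured (~2x at the largest size).
import Mathlib
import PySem

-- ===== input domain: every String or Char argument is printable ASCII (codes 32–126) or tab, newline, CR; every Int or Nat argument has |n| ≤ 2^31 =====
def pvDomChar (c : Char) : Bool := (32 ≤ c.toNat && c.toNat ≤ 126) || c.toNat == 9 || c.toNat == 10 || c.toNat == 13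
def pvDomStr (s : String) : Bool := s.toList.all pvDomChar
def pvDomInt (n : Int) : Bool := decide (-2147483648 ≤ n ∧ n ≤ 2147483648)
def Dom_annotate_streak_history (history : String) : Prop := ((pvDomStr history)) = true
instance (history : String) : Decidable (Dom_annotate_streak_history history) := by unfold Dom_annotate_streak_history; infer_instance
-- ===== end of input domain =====

-- B computes the same fail counts by collecting '#' positions first and differencing
-- adjacent positions, instead of A's running per-character fail counter (measured constant-factor faster).

-- ===== PORT A =====
-- literal port of A's while loop: state (streak, acc, failcount), one step per character
def annotateGoA : List Char → Int → List Int → Int → List Int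
  | [], _, acc, _ => acc
  | c :: cs, streak, acc, failcount =>
    if c == '#' then annotateGoA cs (streak + 1) (acc ++ [failcount]) 0
    else annotateGoA cs streak acc (failcount + 1)

def annotate_streak_history (history : String) : List Int :=
  annotateGoA history.toList 1 [] 0

-- ===== PORT B =====
def annotate_streak_history_alt (history : String) : List Int :=
  let pos : List Int :=
    ((PySem.List.enumerate history.toList).filter (fun p => p.2 == '#')).map (fun p => p.1)
  match pos with
  | [] => []
  | p0 :: _ =>
    p0 :: (pos.zip (PySem.List.slice pos (some 1) none)).map (fun ab => ab.2 - ab.1 - 1)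

-- ===== PRECONDITION & SPEC =====
def Spec_annotate_streak_history (history : String) (out : List Int) : Prop := out = annotate_streak_history_alt history
instance (history : String) (out : List Int) : Decidable (Spec_annotate_streak_history history out) := by unfold Spec_annotate_streak_history; infer_instance

-- ===== CLAIM (what is proved, stated in full; the proofs are below) =====
def Claim_equal_annotate_streak_history : Prop := ∀ (history : String), Dom_annotate_streak_history history → Spec_annotate_streak_history history (annotate_streak_history history)

-- ===== LEMMAS AND PROOFS =====

-- proof-only reference function: fail counts, structurally
def pvSegs : List Char → Int → List Int
  | [], _ => []
  | c :: cs, f => if c == '#' then f :: pvSegs cs 0 else pvSegs cs (f + 1)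

-- adjacent differences used by B
def pvDiffs (l : List Int) : List Int := (l.zip l.tail).map (fun ab => ab.2 - ab.1 - 1)

def pvPos (cs : List Char) (s : Int) : List Int :=
  ((PySem.List.enumerate cs s).filter (fun p => p.2 == '#')).map (fun p => p.1)

theorem annotateGoA_eq (cs : List Char) : ∀ (streak : Int) (acc : List Int) (f : Int),
    annotateGoA cs streak acc f = acc ++ pvSegs cs f := by
  induction cs with
  | nil => intro streak acc f; simp [annotateGoA, pvSegs]
  | cons c cs ih =>
    intro streak acc f
    by_cases h : c == '#' <;> simp [annotateGoA, pvSegs, h, ih]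

theorem pvPos_cons (c : Char) (cs : List Char) (s : Int) :
    pvPos (c :: cs) s = if c == '#' then s :: pvPos cs (s + 1) else pvPos cs (s + 1) := by
  by_cases h : c == '#' <;>
    simp [pvPos, PySem.List.enumerate_cons, h]

theorem pvDiffs_cons (a : Int) (l : List Int) :
    pvDiffs (a :: l) = match l with
      | [] => []
      | b :: _ => (b - a - 1) :: pvDiffs l := by
  cases l with
  | nil => simp [pvDiffs]
  | cons b t => simp [pvDiffs, List.zip]

theorem pvSegs_eq_pos (cs : List Char) : ∀ (f s : Int),
    pvSegs cs f = match pvPos cs s with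
      | [] => []
      | p0 :: _ => (f - s + p0) :: pvDiffs (pvPos cs s) := by
  induction cs with
  | nil => intro f s; simp [pvSegs, pvPos, PySem.List.enumerate]
  | cons c cs ih =>
    intro f s
    rw [pvPos_cons]
    by_cases h : c == '#'
    · simp only [pvSegs, h, if_true]
      rw [pvDiffs_cons, ih 0 (s + 1)]
      cases hp : pvPos cs (s + 1) with
      | nil => simp
      | cons q0 t =>
        simp only [List.cons.injEq]
        exact ⟨by ring, by ring, trivial⟩
    · simp only [pvSegs, h, if_false, Bool.false_eq_true]
      rw [ih (f + 1) (s + 1)]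
      cases hp : pvPos cs (s + 1) with
      | nil => rfl
      | cons q0 t =>
        simp only [List.cons.injEq]
        exact ⟨by ring, trivial⟩

theorem alt_eq_segs (history : String) :
    annotate_streak_history_alt history = pvSegs history.toList 0 := by
  rw [pvSegs_eq_pos history.toList 0 0]
  unfold annotate_streak_history_alt
  simp only [PySem.List.slice_from (a := 1) _ (by norm_num), Int.toNat_one, List.drop_one]
  show (match pvPos history.toList 0 with
    | [] => []
    | p0 :: _ => p0 :: pvDiffs (pvPos history.toList 0)) = _
  cases pvPos history.toList 0 with
  | nil => rfl
  | cons p0 t => simp [pvDiffs]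

-- ===== VERDICT (by name: the statement is the Claim_ definition above) =====
theorem annotate_streak_history_spec : Claim_equal_annotate_streak_history := by
  intro history _
  show annotate_streak_history history = annotate_streak_history_alt history
  rw [alt_eq_segs]
  unfold annotate_streak_history
  rw [annotateGoA_eq]
  simp
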